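-- pv_equiv track=rewrite | github.com/hlinh96it/ase_intelligent_phm | weekly_report/5_Nov15_TestCrop_Performance/crop_signal_0908_modify.py | remove_redundant_loc
-- ===== SOURCE A (Python) =====
-- def make_crop_index(change_location):
--     # create function to crop window
--     crop_window = []
--     for i in range(len(change_location)):
--         if i == 0:
--             crop_window.append([0, change_location[i]])
--             continue
--
--         crop_window.append([change_location[i - 1], change_location[i]])
--
--     return crop_window
--
-- def remove_redundant_loc(change_loc, signal_state):
--     new_loc = [0]
--     current_state = signal_state[0]
--     signal_state_removed = [current_state]
--
--     for idx, val in enumerate(signal_state):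
--         if idx == 0: continue
--         if val != current_state:
--             new_loc.append(change_loc[idx][0])
--             signal_state_removed.append(current_state)
--         if idx == (len(signal_state) - 1):
--             new_loc.append(change_loc[idx][1])
--             signal_state_removed.append(val)
--
--         current_state = val
--     return new_loc, make_crop_index(new_loc), signal_state_removed
-- ===== SOURCE B (Python) =====
-- # B: run-length encode the signal first (nested while loops jumping run by run),
-- # then derive the boundary list, crop windows (via zip) and the removed-state list
-- # directly from the run table. Same O(n) cost as A's stateful change-detection loop.
-- def make_crop_index(change_location):
--     return [[a, b] for a, b in zip([0] + change_location, change_location)]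
--
-- def remove_redundant_loc(change_loc, signal_state):
--     first = signal_state[0]
--     n = len(signal_state)
--     # run-length encoding: runs[k] = (start index, value) of the k-th maximal run
--     runs = []
--     i = 0
--     while i < n:
--         runs.append((i, signal_state[i]))
--         j = i + 1
--         while j < n and signal_state[j] == signal_state[i]:
--             j += 1
--         i = j
--     new_loc = [0] + [change_loc[s][0] for s, _ in runs[1:]]
--     signal_state_removed = [first] + [v for _, v in runs[:-1]]
--     if n > 1:
--         new_loc.append(change_loc[n - 1][1])
--         signal_state_removed.append(signal_state[n - 1])
--     return new_loc, make_crop_index(new_loc), signal_state_removed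
-- ===== Notes on version B (the rewrite author's own statement) =====
-- stated objective: alternative
-- what changed: A threads a stateful change-detection loop over enumerate(signal_state) with a current_state variable and interleaved appends (plus an index-driven crop-window loop); B instead run-length encodes the signal with nested while loops that jump run by run, then derives the boundary list from the run starts, the removed-state list from the run values (all runs but the last), and the crop windows by zipping the boundary list with its 0-prefixed self.
import Mathlib
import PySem

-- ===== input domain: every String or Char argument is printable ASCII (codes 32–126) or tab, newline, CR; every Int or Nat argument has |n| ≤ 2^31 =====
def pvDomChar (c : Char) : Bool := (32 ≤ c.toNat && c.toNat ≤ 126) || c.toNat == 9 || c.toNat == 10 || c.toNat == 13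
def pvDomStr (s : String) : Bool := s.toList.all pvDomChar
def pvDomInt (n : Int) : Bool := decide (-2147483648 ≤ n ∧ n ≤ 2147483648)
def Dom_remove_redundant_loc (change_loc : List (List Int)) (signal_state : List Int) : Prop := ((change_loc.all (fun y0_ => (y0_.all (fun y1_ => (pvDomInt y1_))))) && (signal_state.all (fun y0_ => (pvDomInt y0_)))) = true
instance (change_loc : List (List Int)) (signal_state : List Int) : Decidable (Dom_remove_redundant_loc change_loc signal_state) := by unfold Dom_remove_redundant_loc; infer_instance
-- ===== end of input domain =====

-- B replaces A's stateful change-detection loop by a run-length encoding of the signal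
-- (nested while loops jumping run by run) from which all three result lists are derived;
-- same O(n) cost, objective: alternative decomposition.

-- ===== PORT A =====
def make_crop_index (change_location : List Int) : List (List Int) :=
  (PySem.List.pyRange 0 (change_location.length : Int) 1).foldl
    (fun crop_window i =>
      if i = 0 then crop_window ++ [[0, PySem.List.pyGetD change_location i 0]]
      else crop_window ++ [[PySem.List.pyGetD change_location (i - 1) 0,
                            PySem.List.pyGetD change_location i 0]]) []

-- loop body of A's for-loop, as a helper (n = len(signal_state); state = (new_loc, signal_state_removed, current_state))
def rrlStep (change_loc : List (List Int)) (n : Int)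
    (st : List Int × List Int × Int) (p : Int × Int) : List Int × List Int × Int :=
  if p.1 = 0 then st
  else
    let new_loc := if p.2 ≠ st.2.2 then st.1 ++ [PySem.List.pyGetD (PySem.List.pyGetD change_loc p.1 []) 0 0] else st.1
    let removed := if p.2 ≠ st.2.2 then st.2.1 ++ [st.2.2] else st.2.1
    let new_loc := if p.1 = n - 1 then new_loc ++ [PySem.List.pyGetD (PySem.List.pyGetD change_loc p.1 []) 1 0] else new_loc
    let removed := if p.1 = n - 1 then removed ++ [p.2] else removed
    (new_loc, removed, p.2)

def remove_redundant_loc (change_loc : List (List Int)) (signal_state : List Int) :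
    List Int × List (List Int) × List Int :=
  let current_state := PySem.List.pyGetD signal_state 0 0   -- signal_state[0]; Pre_ excludes the empty list (IndexError)
  let res := (PySem.List.enumerate signal_state 0).foldl
      (rrlStep change_loc (signal_state.length : Int)) ([0], [current_state], current_state)
  (res.1, make_crop_index res.1, res.2.1)

-- ===== PORT B =====
def make_crop_index_alt (change_location : List Int) : List (List Int) :=
  ((0 :: change_location).zip change_location).map (fun p => [p.1, p.2])

-- inner while loop of Source B: advance j while j < n and signal_state[j] == signal_state[i]
-- (the guarded accesses are always in range, so List.getD is exact here)
theorem pvSkip_le {ss : List Int} {base j : Nat}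
    (h : j < ss.length ∧ ss.getD j 0 = ss.getD base 0) : ss.length - (j + 1) < ss.length - j := by
  omega

def pvSkip (ss : List Int) (base j : Nat) : Nat :=
  if h : j < ss.length ∧ ss.getD j 0 = ss.getD base 0 then pvSkip ss base (j + 1) else j
  termination_by ss.length - j
  decreasing_by exact pvSkip_le h

-- j ≤ pvSkip ss base j (needed for pvRuns' termination)
theorem le_pvSkip (ss : List Int) (base j : Nat) : j ≤ pvSkip ss base j := by
  induction j using pvSkip.induct ss base with
  | case1 j h ih => rw [pvSkip, dif_pos h]; omega
  | case2 j h => rw [pvSkip, dif_neg h]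

-- outer while loop of Source B: the run-length encoding, runs[k] = (start, value)
def pvRuns (ss : List Int) (i : Nat) : List (Int × Int) :=
  if h : i < ss.length then
    ((i : Int), ss.getD i 0) :: pvRuns ss (pvSkip ss i (i + 1))
  else []
  termination_by ss.length - i
  decreasing_by have := le_pvSkip ss i (i + 1); omega

def remove_redundant_loc_alt (change_loc : List (List Int)) (signal_state : List Int) :
    List Int × List (List Int) × List Int :=
  let first := PySem.List.pyGetD signal_state 0 0        -- signal_state[0]; Pre_ excludes the empty list
  let n : Int := (signal_state.length : Int)
  let runs := pvRuns signal_state 0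
  let new_loc := 0 :: (runs.drop 1).map
      (fun r => PySem.List.pyGetD (PySem.List.pyGetD change_loc r.1 []) 0 0)
  let removed := first :: runs.dropLast.map (fun r => r.2)
  let new_loc := if 1 < n then new_loc ++ [PySem.List.pyGetD (PySem.List.pyGetD change_loc (n - 1) []) 1 0] else new_loc
  let removed := if 1 < n then removed ++ [PySem.List.pyGetD signal_state (n - 1) 0] else removed
  (new_loc, make_crop_index_alt new_loc, removed)

-- ===== PRECONDITION & SPEC =====
-- Exactly the inputs on which Python A returns: signal_state nonempty (else signal_state[0]
-- raises IndexError), change_loc[i][0] exists at every change index i, and (when n > 1)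
-- change_loc[n-1][1] exists for the trailing boundary.
def Pre_remove_redundant_loc (change_loc : List (List Int)) (signal_state : List Int) : Prop :=
  signal_state ≠ [] ∧
  (∀ i ∈ List.range signal_state.length, 1 ≤ i →
      signal_state.getD i 0 ≠ signal_state.getD (i - 1) 0 →
      i < change_loc.length ∧ 1 ≤ (change_loc.getD i []).length) ∧
  (1 < signal_state.length →
      signal_state.length - 1 < change_loc.length ∧
      2 ≤ (change_loc.getD (signal_state.length - 1) []).length)
instance (change_loc : List (List Int)) (signal_state : List Int) : Decidable (Pre_remove_redundant_loc change_loc signal_state) := by unfold Pre_remove_redundant_loc; infer_instance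

def pvWitness_remove_redundant_loc : List (List Int) × List Int := ([[0, 5], [5, 9]], [1, 2])

def Spec_remove_redundant_loc (change_loc : List (List Int)) (signal_state : List Int) (out : List Int × List (List Int) × List Int) : Prop := out = remove_redundant_loc_alt change_loc signal_state
instance (change_loc : List (List Int)) (signal_state : List Int) (out : List Int × List (List Int) × List Int) : Decidable (Spec_remove_redundant_loc change_loc signal_state out) := by unfold Spec_remove_redundant_loc; infer_instance

-- ===== CLAIM (what is proved, stated in full; the proofs are below) =====
def Claim_equal_remove_redundant_loc : Prop := ∀ (change_loc : List (List Int)) (signal_state : List Int), Dom_remove_redundant_loc change_loc signal_state → Pre_remove_redundant_loc change_loc signal_state → Spec_remove_redundant_loc change_loc signal_state (remove_redundant_loc change_loc signal_state)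

-- ===== LEMMAS AND PROOFS =====

-- the change indices of ss from a on (proof-side abbreviation; A's loop produces exactly these)
def chg (ss : List Int) (a : Int) : List Int :=
  (PySem.List.pyRange a (ss.length : Int) 1).filter
    (fun j => PySem.List.pyGetD ss j 0 ≠ PySem.List.pyGetD ss (j - 1) 0)

theorem chg_nil (ss : List Int) (a : Int) (h : (ss.length : Int) ≤ a) : chg ss a = [] := by
  unfold chg; rw [PySem.List.pyRange_one_eq_nil h]; rfl

theorem chg_cons (ss : List Int) (a : Int) (h : a < (ss.length : Int)) :
    chg ss a = if PySem.List.pyGetD ss a 0 ≠ PySem.List.pyGetD ss (a - 1) 0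
      then a :: chg ss (a + 1) else chg ss (a + 1) := by
  unfold chg
  rw [PySem.List.pyRange_one_cons h, List.filter_cons]
  split_ifs with h1 h2 h2 <;> simp_all

-- pvSkip facts: values are constant on [base, pvSkip) and (when in range) differ at pvSkip
theorem pvSkip_ub (ss : List Int) (base j : Nat) (hj : j ≤ ss.length) :
    pvSkip ss base j ≤ ss.length := by
  induction j using pvSkip.induct ss base with
  | case1 j h ih => rw [pvSkip, dif_pos h]; exact ih (by omega)
  | case2 j h => rw [pvSkip, dif_neg h]; omega

theorem pvSkip_const (ss : List Int) (base j : Nat) (t : Nat)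
    (h1 : j ≤ t) (h2 : t < pvSkip ss base j) : ss.getD t 0 = ss.getD base 0 := by
  induction j using pvSkip.induct ss base with
  | case1 j h ih =>
    rw [pvSkip, dif_pos h] at h2
    rcases Nat.eq_or_lt_of_le h1 with rfl | hlt
    · exact h.2
    · exact ih (by omega) h2
  | case2 j h => rw [pvSkip, dif_neg h] at h2; omega

theorem pvSkip_ne (ss : List Int) (base j : Nat)
    (h : pvSkip ss base j < ss.length) :
    ss.getD (pvSkip ss base j) 0 ≠ ss.getD base 0 := by
  induction j using pvSkip.induct ss base with
  | case1 j hc ih => rw [pvSkip, dif_pos hc] at h ⊢; exact ih h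
  | case2 j hc =>
    rw [pvSkip, dif_neg hc] at h ⊢
    intro he; exact hc ⟨h, he⟩

-- on a change-free stretch [t, s) ending at s = pvSkip, chg collapses to its value at s
theorem chg_seg (ss : List Int) (i : Nat) (hi : i < ss.length) (t : Nat)
    (h1 : i < t) (h2 : t ≤ pvSkip ss i (i + 1)) :
    chg ss (t : Int) =
      if pvSkip ss i (i + 1) < ss.length
      then ((pvSkip ss i (i + 1) : Int)) :: chg ss ((pvSkip ss i (i + 1) : Int) + 1)
      else [] := by
  set s := pvSkip ss i (i + 1) with hs
  have hub : s ≤ ss.length := pvSkip_ub ss i (i + 1) (by omega)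
  obtain ⟨d, hd⟩ : ∃ d, s - t = d := ⟨s - t, rfl⟩
  induction d generalizing t with
  | zero =>
    have hts : t = s := by omega
    subst hts
    by_cases hlt : s < ss.length
    · rw [if_pos hlt, chg_cons ss (s : Int) (by exact_mod_cast hlt)]
      have hne : ss.getD s 0 ≠ ss.getD (s - 1) 0 := by
        have hnei : ss.getD s 0 ≠ ss.getD i 0 := by
          rw [hs]; exact pvSkip_ne ss i (i + 1) (by rw [← hs]; exact hlt)
        have heq : ss.getD (s - 1) 0 = ss.getD i 0 := by
          rcases Nat.eq_or_lt_of_le (by omega : i ≤ s - 1) with he | hl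
          · rw [← he]
          · exact pvSkip_const ss i (i + 1) (s - 1) (by omega) (by rw [← hs]; omega)
        rw [heq]; exact hnei
      have hc : ((s : Int) - 1) = ((s - 1 : Nat) : Int) := by omega
      rw [if_pos]
      rw [PySem.List.pyGetD_natCast, hc, PySem.List.pyGetD_natCast]
      exact hne
    · rw [if_neg hlt]
      exact chg_nil ss (s : Int) (by omega)
  | succ d ih =>
    have htlt : t < s := by omega
    have htlen : t < ss.length := by omega
    have heqt : ss.getD t 0 = ss.getD i 0 :=
      pvSkip_const ss i (i + 1) t (by omega) (by rw [← hs]; omega)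
    have heqt1 : ss.getD (t - 1) 0 = ss.getD i 0 := by
      rcases Nat.eq_or_lt_of_le (by omega : i ≤ t - 1) with he | hl
      · rw [← he]
      · exact pvSkip_const ss i (i + 1) (t - 1) (by omega) (by rw [← hs]; omega)
    have hc : ((t : Int) - 1) = ((t - 1 : Nat) : Int) := by omega
    rw [chg_cons ss (t : Int) (by exact_mod_cast htlen), if_neg, show ((t : Int) + 1) = ((t + 1 : Nat) : Int) by push_cast; ring]
    · exact ih (t + 1) (by omega) (by omega) (by omega)
    · rw [PySem.List.pyGetD_natCast, hc, PySem.List.pyGetD_natCast, heqt, heqt1]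
      simp

-- run starts = 0 :: change indices; dropLast of run values = old state at each change
theorem runs_fst (ss : List Int) (i : Nat) :
    i < ss.length → (pvRuns ss i).map Prod.fst = (i : Int) :: chg ss ((i : Int) + 1) := by
  induction i using pvRuns.induct ss with
  | case1 i h ih =>
    intro _
    rw [pvRuns, dif_pos h, List.map_cons]
    have hseg := chg_seg ss i h (i + 1) (by omega) (le_pvSkip ss i (i + 1))
    rw [show ((i : Int) + 1) = ((i + 1 : Nat) : Int) by push_cast; ring, hseg]
    by_cases hlt : pvSkip ss i (i + 1) < ss.length
    · rw [if_pos hlt, ih hlt]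
    · rw [if_neg hlt, pvRuns, dif_neg hlt]; rfl
  | case2 i h => intro hi; exact absurd hi h

theorem runs_snd (ss : List Int) (i : Nat) :
    i < ss.length → (pvRuns ss i).dropLast.map Prod.snd =
      (chg ss ((i : Int) + 1)).map (fun j => PySem.List.pyGetD ss (j - 1) 0) := by
  induction i using pvRuns.induct ss with
  | case1 i h ih =>
    intro _
    rw [pvRuns, dif_pos h]
    have hseg := chg_seg ss i h (i + 1) (by omega) (le_pvSkip ss i (i + 1))
    rw [show ((i : Int) + 1) = ((i + 1 : Nat) : Int) by push_cast; ring, hseg]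
    have his : i + 1 ≤ pvSkip ss i (i + 1) := le_pvSkip ss i (i + 1)
    by_cases hlt : pvSkip ss i (i + 1) < ss.length
    · rw [if_pos hlt]
      have hne : pvRuns ss (pvSkip ss i (i + 1)) ≠ [] := by
        rw [pvRuns, dif_pos hlt]; simp
      rw [List.dropLast_cons_of_ne_nil hne, List.map_cons, ih hlt, List.map_cons]
      have hc : (((pvSkip ss i (i + 1) : Nat) : Int) - 1) = ((pvSkip ss i (i + 1) - 1 : Nat) : Int) := by
        omega
      have hval : PySem.List.pyGetD ss (((pvSkip ss i (i + 1) : Nat) : Int) - 1) 0 = ss.getD i 0 := by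
        rw [hc, PySem.List.pyGetD_natCast]
        rcases Nat.eq_or_lt_of_le (by omega : i ≤ pvSkip ss i (i + 1) - 1) with he | hl
        · rw [← he]
        · exact pvSkip_const ss i (i + 1) _ (by omega) (by omega)
      rw [hval]
    · rw [if_neg hlt, pvRuns, dif_neg hlt]
      simp
  | case2 i h => intro hi; exact absurd hi h

-- the two crop-window builders agree on every boundary list
theorem mci_eq (loc : List Int) : make_crop_index loc = make_crop_index_alt loc := by
  unfold make_crop_index make_crop_index_alt
  rw [PySem.List.foldl_congr_mem _ _
      (fun acc i => acc ++ [if i = 0 then [0, PySem.List.pyGetD loc i 0]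
        else [PySem.List.pyGetD loc (i - 1) 0, PySem.List.pyGetD loc i 0]]) _
      (by intro acc x hx; by_cases h : x = 0 <;> simp [h]),
    PySem.List.foldl_append_singleton_eq_map]
  apply List.ext_getElem
  · simp [PySem.List.length_pyRange_one]
  · intro i h1 h2
    simp only [List.getElem_map, PySem.List.getElem_pyRange_one, List.getElem_zip, List.nil_append]
    have hil : i < loc.length := by
      simpa [PySem.List.length_pyRange_one] using h1
    rcases Nat.eq_zero_or_pos i with hi | hi
    · subst hi
      simp [PySem.List.pyGetD_ofNat', hil]
    · have h0 : (0 : Int) + (i : Int) = ((i : Nat) : Int) := by ring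
      have hne : ((i : Nat) : Int) ≠ 0 := by omega
      have hm1 : ((i : Nat) : Int) - 1 = ((i - 1 : Nat) : Int) := by omega
      rw [h0, if_neg hne, hm1, PySem.List.pyGetD_natCast, PySem.List.pyGetD_natCast]
      rw [List.getD_eq_getElem _ _ (by omega), List.getD_eq_getElem _ _ hil]
      rcases i with _ | k
      · omega
      · simp

-- A's loop over the enumerated suffix of signal_state starting at index j ≥ 1
theorem loopA (change_loc : List (List Int)) (signal_state : List Int)
    (l : List Int) (j : Nat) (c : Int) (nl rm : List Int)
    (hj : 1 ≤ j) (h1 : j + l.length = signal_state.length)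
    (h3 : signal_state.drop j = l)
    (h4 : PySem.List.pyGetD signal_state ((j : Int) - 1) 0 = c) :
    (PySem.List.enumerate l (j : Int)).foldl
        (rrlStep change_loc (signal_state.length : Int)) (nl, rm, c) =
      (nl ++ ((PySem.List.pyRange (j : Int) (signal_state.length : Int) 1).filter
                (fun i => PySem.List.pyGetD signal_state i 0 ≠ PySem.List.pyGetD signal_state (i - 1) 0)).map
              (fun i => PySem.List.pyGetD (PySem.List.pyGetD change_loc i []) 0 0)
          ++ (if l = [] then [] else [PySem.List.pyGetD (PySem.List.pyGetD change_loc ((signal_state.length : Int) - 1) []) 1 0]),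
       rm ++ ((PySem.List.pyRange (j : Int) (signal_state.length : Int) 1).filter
                (fun i => PySem.List.pyGetD signal_state i 0 ≠ PySem.List.pyGetD signal_state (i - 1) 0)).map
              (fun i => PySem.List.pyGetD signal_state (i - 1) 0)
          ++ (if l = [] then [] else [PySem.List.pyGetD signal_state ((signal_state.length : Int) - 1) 0]),
       l.getLastD c) := by
  induction l generalizing j c nl rm with
  | nil =>
    have hjn : j = signal_state.length := by simpa using h1
    simp [PySem.List.enumerate_nil, hjn]
  | cons v t ih =>
    have hjlt : j < signal_state.length := by simp at h1 ⊢; omega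
    have hdrop := List.drop_eq_getElem_cons (l := signal_state) (i := j) hjlt
    rw [h3] at hdrop
    have hv : v = signal_state[j] := (List.cons_eq_cons.mp hdrop).1
    have ht : signal_state.drop (j + 1) = t := (List.cons_eq_cons.mp hdrop).2.symm
    have hgj : PySem.List.pyGetD signal_state ((j : Int)) 0 = v := by
      rw [PySem.List.pyGetD_natCast, List.getD_eq_getElem _ _ hjlt, hv]
    have hjne : ((j : Int)) ≠ 0 := by omega
    rw [PySem.List.enumerate_cons, List.foldl_cons]
    rw [PySem.List.pyRange_one_cons (by omega : (j : Int) < (signal_state.length : Int))]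
    rcases eq_or_ne t ([] : List Int) with htnil | htne
    · subst htnil
      have hlast : (j : Int) = (signal_state.length : Int) - 1 := by
        simp at h1; omega
      have hrest : PySem.List.pyRange ((j : Int) + 1) (signal_state.length : Int) 1 = [] :=
        PySem.List.pyRange_one_eq_nil (by omega)
      simp only [PySem.List.enumerate_nil, List.foldl_nil, rrlStep, if_neg hjne, hrest,
        List.filter_cons, List.filter_nil, hgj, h4, if_pos hlast]
      by_cases hvc : v = c <;>
        simp [hvc, ← hlast, hgj, h4, List.append_assoc]
    · have hnotlast : ¬ ((j : Int) = (signal_state.length : Int) - 1) := by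
        have : 1 ≤ t.length := List.length_pos_iff.mpr htne
        simp at h1; omega
      have step_eq : rrlStep change_loc (signal_state.length : Int) (nl, rm, c) ((j : Int), v) =
          ((if v ≠ c then nl ++ [PySem.List.pyGetD (PySem.List.pyGetD change_loc (j : Int) []) 0 0] else nl),
           (if v ≠ c then rm ++ [c] else rm), v) := by
        simp only [rrlStep, if_neg hjne, if_neg hnotlast]
      rw [step_eq]
      have hcast : ((j : Int)) + 1 = (((j + 1 : Nat) : Int)) := by push_cast; ring
      have h4' : PySem.List.pyGetD signal_state (((j + 1 : Nat) : Int) - 1) 0 = v := by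
        have : (((j + 1 : Nat) : Int)) - 1 = (j : Int) := by push_cast; ring
        rw [this, hgj]
      rw [hcast, ih (j + 1) v _ _ (by omega) (by simp at h1 ⊢; omega) ht h4']
      simp only [List.filter_cons, hgj, h4, ne_eq, htne, if_neg (by simp : ¬(v :: t = [])),
        ← hcast]
      rcases t with _ | ⟨w, t'⟩
      · exact absurd rfl htne
      · have hgl : ∀ d : Int, (w :: t').getLast?.getD d = (w :: t').getLast (by simp) := by
          intro d; rw [List.getLast?_eq_some_getLast (by simp)]; rfl
        by_cases hvc : v = c <;> simp [hvc, h4, List.append_assoc, hgl]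

-- ===== VERDICT (by name: the statement is the Claim_ definition above) =====
theorem remove_redundant_loc_spec : Claim_equal_remove_redundant_loc := by
  intro change_loc signal_state hDom hPre
  unfold Spec_remove_redundant_loc
  obtain ⟨hne, -, -⟩ := hPre
  rcases signal_state with _ | ⟨s0, rest⟩
  · exact absurd rfl hne
  have h0 : PySem.List.pyGetD (s0 :: rest) (0 : Int) 0 = s0 := by
    simp [PySem.List.pyGetD_ofNat']
  -- A's loop, characterised by loopA
  simp only [remove_redundant_loc, h0]
  rw [PySem.List.enumerate_cons, List.foldl_cons]
  have hstep0 : ∀ st, rrlStep change_loc (((s0 :: rest).length : Nat) : Int) st ((0 : Int), s0) = st := by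
    intro st; simp [rrlStep]
  rw [hstep0]
  rw [show (0 : Int) + 1 = ((1 : Nat) : Int) by norm_num]
  rw [loopA change_loc (s0 :: rest) rest 1 s0 [0] [s0] (le_refl 1)
    (by simp [Nat.add_comm]) rfl (by norm_num [h0])]
  rw [mci_eq]
  -- B's run table, characterised by runs_fst / runs_snd
  have hlen0 : 0 < (s0 :: rest).length := by simp
  have hfst := runs_fst (s0 :: rest) 0 hlen0
  have hsnd := runs_snd (s0 :: rest) 0 hlen0
  rw [show (((0 : Nat) : Int) + 1) = (1 : Int) by norm_num] at hfst hsnd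
  have hM1 : ((pvRuns (s0 :: rest) 0).drop 1).map
        (fun r => PySem.List.pyGetD (PySem.List.pyGetD change_loc r.1 []) 0 0) =
      (chg (s0 :: rest) 1).map
        (fun x => PySem.List.pyGetD (PySem.List.pyGetD change_loc x []) 0 0) := by
    rw [show ((pvRuns (s0 :: rest) 0).drop 1).map
          (fun r => PySem.List.pyGetD (PySem.List.pyGetD change_loc r.1 []) 0 0) =
        (((pvRuns (s0 :: rest) 0).map Prod.fst).drop 1).map
          (fun x => PySem.List.pyGetD (PySem.List.pyGetD change_loc x []) 0 0) by
      rw [← List.map_drop, List.map_map]; rfl]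
    rw [hfst]; simp
  have hM2 : (pvRuns (s0 :: rest) 0).dropLast.map (fun r => r.2) =
      (chg (s0 :: rest) 1).map (fun j => PySem.List.pyGetD (s0 :: rest) (j - 1) 0) := hsnd
  simp only [remove_redundant_loc_alt, h0, hM1, hM2]
  rcases rest with _ | ⟨w, t⟩
  · simp [chg_nil ([s0] : List Int) 1 (by simp)]
  · have hlt : (1 : Int) < ((s0 :: w :: t).length : Int) := by simp
    simp only [if_pos hlt, if_neg (by simp : ¬(w :: t = [])), Nat.cast_one, chg]
    simp
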